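-- pv_equiv track=rewrite | github.com/daniel-reich/ubiquitous-fiesta | Y4gwcGfcGb3SKz6Tu_7.py | max_separator
-- ===== SOURCE A (Python) =====
-- def max_separator(txt):
--     r = []
--     d = sorted([[y, x] for x, y in enumerate(txt)], key=lambda x : x[0])
--     last = d[0][0]
--     for i in range(1, len(d)):
--         if d[i][0] == last:
--             add = [d[i][1] - d[i - 1][1], d[i][0]]
--             r.append(add)
--         last = d[i][0]
--     r = sorted(r, key=lambda x : x[0], reverse=True)
--     return sorted([y for x, y in r if x == r[0][0]])
-- ===== SOURCE B (Python) =====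
-- def max_separator(txt):
--     last = {}
--     gaps = []
--     for i, c in enumerate(txt):
--         if c in last:
--             gaps.append((i - last[c], c))
--         last[c] = i
--     if not gaps:
--         return []
--     best = max(g for g, _ in gaps)
--     return sorted(c for g, c in gaps if g == best)
-- ===== Notes on version B (the rewrite author's own statement) =====
-- stated objective: faster
-- what changed: Replaced the sort-of-all-(char,index)-pairs followed by an adjacency scan with a single left-to-right pass keeping a dict of each character's last index, collecting consecutive-occurrence gaps directly, then one max and one filter; only the (usually tiny) answer list is sorted.
-- crash fix: On the empty string A raises IndexError when it reads the first element of the empty sorted pair list (its only raising input: for nonempty strings with no repeated character the final comprehension is empty and its guard is never evaluated, so A returns the empty list); B returns the empty list there. — e.g. on max_separator(""): A raises IndexError, B returns []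
import Mathlib
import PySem

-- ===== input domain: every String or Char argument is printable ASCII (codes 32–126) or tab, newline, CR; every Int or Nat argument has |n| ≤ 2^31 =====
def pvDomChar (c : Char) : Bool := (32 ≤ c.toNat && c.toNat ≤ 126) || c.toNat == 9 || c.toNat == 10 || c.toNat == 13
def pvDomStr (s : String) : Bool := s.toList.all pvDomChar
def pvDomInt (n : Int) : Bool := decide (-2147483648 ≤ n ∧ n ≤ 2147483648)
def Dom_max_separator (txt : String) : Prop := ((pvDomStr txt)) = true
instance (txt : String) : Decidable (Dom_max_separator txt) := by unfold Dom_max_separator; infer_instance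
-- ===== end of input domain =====

-- B replaces A's sort-all-pairs-then-scan with a single pass keeping each character's
-- last index in a dict; only the return value is compared (neither version mutates its argument).

-- ===== PORT A =====
-- the body of A's 'for i in range(1, len(d))' loop, with state (r, last)
def aBody (d : List (String × Int)) (st : List (Int × String) × String) (i : Int) :
    List (Int × String) × String :=
  let di := PySem.List.pyGetD d i ("", 0)
  let dim := PySem.List.pyGetD d (i - 1) ("", 0)
  (if di.1 == st.2 then st.1 ++ [(di.2 - dim.2, di.1)] else st.1, di.1)

def aLoop (d : List (String × Int)) (st : List (Int × String) × String) :
    List (Int × String) × String :=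
  (PySem.List.pyRange 1 (d.length : Int) 1).foldl (aBody d) st

def max_separator (txt : String) : List String :=
  let d := PySem.List.sorted
    ((PySem.List.enumerate txt.toList 0).map (fun p => (String.ofList [p.2], p.1)))
    (fun x => x.1) false
  match d with
  | [] => []  -- Python raises IndexError reading the head of the empty sorted list (only for txt = ""); excluded by Pre_
  | d0 :: _ =>
    let r := PySem.List.sorted (aLoop d ([], d0.1)).1 (fun x => x.1) true
    -- Python evaluates the guard's r-head subscript lazily, once per element of r: when r = [] (no repeated
    -- character) the comprehension is empty, that subscript is never evaluated, and A returns [].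
    -- The filter below evaluates the same guard only for elements of r, so it is exact.
    PySem.List.sorted
      ((r.filter (fun p => p.1 == (PySem.List.pyGetD r 0 (0, "")).1)).map (fun p => p.2))
      (fun y => y) false

-- ===== PORT B =====
-- one step of B's scan: append the gap to the last occurrence (if any), update last[c]
def bStep (st : List (Int × String) × PySem.Dict String Int) (p : Int × Char) :
    List (Int × String) × PySem.Dict String Int :=
  let c := String.ofList [p.2]
  -- 'last[c]' is guarded by 'c in last', so getD's default is never exposed
  (if st.2.contains c then st.1 ++ [(p.1 - st.2.getD c 0, c)] else st.1, st.2.insert c p.1)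

def max_separator_alt (txt : String) : List String :=
  let st := (PySem.List.enumerate txt.toList 0).foldl bStep ([], PySem.Dict.empty)
  if st.1.isEmpty then []
  else
    match PySem.List.max? (st.1.map (fun p => p.1)) (fun x => x) with
    | none => []  -- unreachable: st.1 ≠ []
    | some best =>
      PySem.List.sorted ((st.1.filter (fun p => p.1 == best)).map (fun p => p.2))
        (fun y => y) false

-- ===== PRECONDITION & SPEC =====
-- Pre_ excludes exactly the empty string, the ONLY input on which A raises: there
-- the head of the empty sorted pair list is subscripted (IndexError).  On every nonempty string A returns
-- normally — including strings with no repeated character, where r = [] and the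
-- comprehension over it is empty, so its guard is never evaluated and A returns []
-- (B matches that inside Pre_; see the Claim_raises block for the excluded input).
def Pre_max_separator (txt : String) : Prop := txt ≠ ""
instance (txt : String) : Decidable (Pre_max_separator txt) := by
  unfold Pre_max_separator; infer_instance
def pvWitness_max_separator : String := "aa"

-- On the empty string A raises IndexError reading the head of the empty sorted list (its only raising input);
-- B returns [] there.
def Raises_max_separator (txt : String) : Prop := txt = ""
instance (txt : String) : Decidable (Raises_max_separator txt) := by
  unfold Raises_max_separator; infer_instance
def pvRaiseWitness_max_separator : String := ""
def pvRaiseWitnessOut_max_separator : List String := []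

def Spec_max_separator (txt : String) (out : List String) : Prop := out = max_separator_alt txt
instance (txt : String) (out : List String) : Decidable (Spec_max_separator txt out) := by
  unfold Spec_max_separator; infer_instance

-- ===== CLAIM (what is proved, stated in full; the proofs are below) =====
def Claim_equal_max_separator : Prop :=
  ∀ (txt : String), Dom_max_separator txt → Pre_max_separator txt →
    Spec_max_separator txt (max_separator txt)

def Claim_raises_max_separator : Prop :=
  (∀ (txt : String), Dom_max_separator txt → Raises_max_separator txt →
    ¬ Pre_max_separator txt) ∧
  (Dom_max_separator (pvRaiseWitness_max_separator) ∧
    Raises_max_separator (pvRaiseWitness_max_separator) ∧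
    max_separator_alt (pvRaiseWitness_max_separator) = pvRaiseWitnessOut_max_separator)

-- ===== LEMMAS AND PROOFS =====

-- the (char, index) pairs A sorts: enumerate txt, swapped
def esL (l : List Char) : List (String × Int) :=
  (PySem.List.enumerate l 0).map (fun p => (String.ofList [p.2], p.1))

-- adjacent differences of a list of indices
def adjG : List Int → List Int
  | [] => []
  | [_] => []
  | a :: b :: t => (b - a) :: adjG (b :: t)

-- the r-list A's loop builds, as a structural scan over the sorted list
def scanR : List (String × Int) → List (Int × String)
  | [] => []
  | [_] => []
  | x :: y :: t => (if y.1 == x.1 then [(y.2 - x.2, y.1)] else []) ++ scanR (y :: t)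

-- indices of occurrences of character-string c in l
def occI (l : List Char) (c : String) : List Int :=
  ((esL l).filter (fun p => p.1 == c)).map (fun p => p.2)

lemma esL_append (l : List Char) (ch : Char) :
    esL (l ++ [ch]) = esL l ++ [(String.ofList [ch], (l.length : Int))] := by
  simp [esL, PySem.List.enumerate_append, PySem.List.enumerate]

lemma adjG_append (xs : List Int) (n : Int) :
    adjG (xs ++ [n]) = adjG xs ++ (match xs.getLast? with
      | none => []
      | some a => [n - a]) := by
  induction xs with
  | nil => simp [adjG]
  | cons a t ih =>
    cases t with
    | nil => simp [adjG]
    | cons b t' =>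
      simp only [List.cons_append] at ih ⊢
      simp [adjG, ih, List.getLast?_cons_cons]

-- Python indexing: (x :: xs)[i] = xs[i-1] for i ≥ 1
lemma pyGetD_cons_of_pos {α : Type} (x : α) (xs : List α) (i : Int) (hi : 1 ≤ i) (dflt : α) :
    PySem.List.pyGetD (x :: xs) i dflt = PySem.List.pyGetD xs (i - 1) dflt := by
  obtain ⟨k, hk⟩ : ∃ k : Nat, i = ((k + 1 : Nat) : Int) :=
    ⟨(i - 1).toNat, by omega⟩
  subst hk
  have h2 : ((k + 1 : Nat) : Int) - 1 = ((k : Nat) : Int) := by push_cast; ring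
  rw [h2, PySem.List.pyGetD_natCast, PySem.List.pyGetD_natCast]
  rfl

-- the loop body only looks at d[i] and d[i-1]: shifting the range drops the head
lemma fold_shift (x : String × Int) (d : List (String × Int)) (a b : Int) (ha : 2 ≤ a)
    (st : List (Int × String) × String) :
    (PySem.List.pyRange a b 1).foldl (aBody (x :: d)) st =
      (PySem.List.pyRange (a - 1) (b - 1) 1).foldl (aBody d) st := by
  rw [PySem.List.pyRange_one a b, PySem.List.pyRange_one (a - 1) (b - 1)]
  have hn : (b - 1 - (a - 1)) = b - a := by ring
  rw [hn, List.foldl_map, List.foldl_map]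
  apply PySem.List.foldl_congr_mem
  intro acc k _
  show aBody (x :: d) acc (a + (k : Int)) = aBody d acc (a - 1 + (k : Int))
  unfold aBody
  rw [pyGetD_cons_of_pos x d (a + (k : Int)) (by omega),
      pyGetD_cons_of_pos x d (a + (k : Int) - 1) (by omega)]
  have e1 : a + (k : Int) - 1 = a - 1 + (k : Int) := by ring
  rw [e1]

-- A's index loop equals the structural scan
lemma aLoop_eq_scanR (tl : List (String × Int)) :
    ∀ (d0 : String × Int) (acc : List (Int × String)),
      aLoop (d0 :: tl) (acc, d0.1) =
        (acc ++ scanR (d0 :: tl), ((d0 :: tl).getLast (by simp)).1) := by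
  induction tl with
  | nil =>
    intro d0 acc
    simp [aLoop, scanR, PySem.List.pyRange_one_eq_nil (by norm_num : (1 : Int) ≤ 1)]
  | cons y t ih =>
    intro d0 acc
    have hlen : ((d0 :: y :: t).length : Int) = (t.length : Int) + 2 := by
      simp; ring
    have hcons : PySem.List.pyRange 1 ((d0 :: y :: t).length : Int) 1 =
        1 :: PySem.List.pyRange 2 ((d0 :: y :: t).length : Int) 1 := by
      rw [PySem.List.pyRange_one_cons (by omega)]
      norm_num
    rw [aLoop, hcons, List.foldl_cons]
    have hstep : aBody (d0 :: y :: t) (acc, d0.1) 1 =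
        (acc ++ (if y.1 == d0.1 then [(y.2 - d0.2, y.1)] else []), y.1) := by
      unfold aBody
      rw [pyGetD_cons_of_pos d0 (y :: t) 1 (by norm_num)]
      norm_num [PySem.List.pyGetD_zero_cons]
      split <;> simp
    rw [hstep]
    rw [fold_shift d0 (y :: t) 2 ((d0 :: y :: t).length : Int) (by norm_num)]
    have hb : ((d0 :: y :: t).length : Int) - 1 = ((y :: t).length : Int) := by
      simp
    rw [hb, show (2 : Int) - 1 = 1 by norm_num]
    have := ih y (acc ++ (if y.1 == d0.1 then [(y.2 - d0.2, y.1)] else []))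
    rw [aLoop] at this
    rw [this]
    simp [scanR, List.getLast_cons]

-- stability of the insertion sort on the fst-key classes
lemma filter_fst_insertBy (c : String) (x : String × Int) (ys : List (String × Int))
    (hys : ys.Pairwise (fun a b => a.1 ≤ b.1)) :
    (PySem.List.insertBy (fun a b => decide (a.1 < b.1)) x ys).filter (fun p => p.1 == c) =
      if x.1 = c then ys.filter (fun p => p.1 == c) ++ [x]
      else ys.filter (fun p => p.1 == c) := by
  induction ys with
  | nil =>
    by_cases hx : x.1 = c <;> simp [PySem.List.insertBy, List.filter, hx]
  | cons y ys ih =>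
    rcases List.pairwise_cons.mp hys with ⟨hy, hys'⟩
    by_cases hlt : x.1 < y.1
    · rw [show PySem.List.insertBy (fun a b => decide (a.1 < b.1)) x (y :: ys) =
          x :: y :: ys by simp [PySem.List.insertBy, hlt]]
      by_cases hx : x.1 = c
      · have hnil : (y :: ys).filter (fun p => p.1 == c) = [] := by
          rw [List.filter_eq_nil_iff]
          intro p hp
          have h1 : y.1 ≤ p.1 := by
            rcases List.mem_cons.mp hp with h | h
            · rw [h]
            · exact hy p h
          have h2 : c < p.1 := lt_of_lt_of_le (hx ▸ hlt) h1
          simp only [beq_iff_eq]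
          exact fun hc => absurd (hc ▸ h2) (lt_irrefl c)
        simp [hx, hnil]
      · simp [List.filter_cons, hx, beq_iff_eq]
    · rw [show PySem.List.insertBy (fun a b => decide (a.1 < b.1)) x (y :: ys) =
          y :: PySem.List.insertBy (fun a b => decide (a.1 < b.1)) x ys by
            simp [PySem.List.insertBy, hlt]]
      rw [List.filter_cons, ih hys']
      by_cases hy' : y.1 = c <;> by_cases hx : x.1 = c <;> simp [hy', hx]

lemma filter_fst_sorted (xs : List (String × Int)) (c : String) :
    (PySem.List.sorted xs (fun p => p.1) false).filter (fun p => p.1 == c) =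
      xs.filter (fun p => p.1 == c) := by
  induction xs using List.reverseRecOn with
  | nil => rfl
  | append_singleton xs x ih =>
    rw [PySem.List.sorted_eq_foldl_insertBy, List.foldl_append, List.foldl_cons,
        List.foldl_nil, ← PySem.List.sorted_eq_foldl_insertBy]
    rw [filter_fst_insertBy c x _ (PySem.List.sorted_pairwise xs (fun p => p.1)), List.filter_append]
    by_cases hx : x.1 = c <;> simp [hx, ih, beq_iff_eq]

-- per-character content of the scan over a key-sorted list
lemma scanR_filter (c : String) :
    ∀ d : List (String × Int), d.Pairwise (fun a b => a.1 ≤ b.1) →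
      (scanR d).filter (fun p => p.2 == c) =
        (adjG ((d.filter (fun p => p.1 == c)).map (fun p => p.2))).map (fun g => (g, c)) := by
  intro d
  induction d with
  | nil => intro _; rfl
  | cons x tl ih =>
    intro hp
    cases tl with
    | nil =>
      by_cases hx : x.1 = c <;> simp [scanR, adjG, hx]
    | cons y t =>
      rcases List.pairwise_cons.mp hp with ⟨hx1, hp'⟩
      have ihy := ih hp'
      by_cases hx : x.1 = c
      · by_cases hy : y.1 = c
        · -- both in class c: the adjacent pair contributes
          have hyx : y.1 == x.1 := by rw [beq_iff_eq, hy, hx]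
          rw [show scanR (x :: y :: t) = (y.2 - x.2, y.1) :: scanR (y :: t) by
              simp [scanR, hyx]]
          rw [List.filter_cons]
          simp only [hy, beq_self_eq_true, if_pos]
          rw [ihy]
          simp [hx, hy, adjG]
        · -- x ends class c: everything after has key > c, its class-c filter is empty
          have hlt : c < y.1 := by
            have := hx1 y (by simp)
            rcases lt_or_eq_of_le this with h | h
            · exact hx ▸ h
            · exact absurd (h.symm) (fun hh => hy (hh ▸ hx))
          have hnil : (y :: t).filter (fun p => p.1 == c) = [] := by
            rw [List.filter_eq_nil_iff]
            intro p hmem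
            have h1 : y.1 ≤ p.1 := by
              rcases List.mem_cons.mp hmem with h | h
              · rw [h]
              · exact (List.pairwise_cons.mp hp').1 p h
            simp only [beq_iff_eq]
            intro hc
            rw [hc] at h1
            exact absurd (lt_of_lt_of_le hlt h1) (lt_irrefl c)
          have hyx : (y.1 == x.1) = false := by
            rw [beq_eq_false_iff_ne]
            exact fun hh => hy (hh ▸ hx ▸ rfl)
          rw [show scanR (x :: y :: t) = scanR (y :: t) by simp [scanR, hyx]]
          rw [ihy, hnil]
          simp [hx, hnil, adjG]
      · -- x not in class c: drop it on both sides
        have hfil : (x :: y :: t).filter (fun p => p.1 == c) =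
            (y :: t).filter (fun p => p.1 == c) := by
          simp [List.filter_cons, hx]
        rw [hfil, ← ihy]
        rcases hcond : (y.1 == x.1) with _ | _
        · rw [show scanR (x :: y :: t) = scanR (y :: t) by simp [scanR, hcond]]
        · have hyc : (y.1 == c) = false := by
            rw [beq_eq_false_iff_ne]
            exact fun hh => hx ((beq_iff_eq.mp hcond) ▸ hh)
          rw [show scanR (x :: y :: t) = (y.2 - x.2, y.1) :: scanR (y :: t) by
              simp [scanR, hcond]]
          simp [hyc]

-- B's scan state after processing l
def runB (l : List Char) : List (Int × String) × PySem.Dict String Int :=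
  (PySem.List.enumerate l 0).foldl bStep ([], PySem.Dict.empty)

lemma runB_append (l : List Char) (ch : Char) :
    runB (l ++ [ch]) = bStep (runB l) ((l.length : Int), ch) := by
  simp [runB, PySem.List.enumerate_append, List.foldl_append, PySem.List.enumerate]

lemma occI_append (l : List Char) (ch : Char) (c : String) :
    occI (l ++ [ch]) c =
      occI l c ++ (if String.ofList [ch] = c then [((l.length : Nat) : Int)] else []) := by
  rw [occI, esL_append, List.filter_append, List.map_append]
  by_cases h : String.ofList [ch] = c <;> simp [occI, h]

lemma runB_inv (l : List Char) :
    (∀ c : String, (runB l).2.get? c = (occI l c).getLast?) ∧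
    (∀ c : String, (runB l).1.filter (fun p => p.2 == c) =
      (adjG (occI l c)).map (fun g => (g, c))) := by
  induction l using List.reverseRecOn with
  | nil =>
    constructor <;> intro c <;>
      simp [runB, occI, esL, PySem.List.enumerate, adjG, PySem.Dict.get?_empty]
  | append_singleton l ch ih =>
    obtain ⟨ih1, ih2⟩ := ih
    have h2 : (bStep (runB l) ((l.length : Int), ch)).2 =
        (runB l).2.insert (String.ofList [ch]) (l.length : Int) := rfl
    have h1 : (bStep (runB l) ((l.length : Int), ch)).1 =
        (if (runB l).2.contains (String.ofList [ch]) then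
          (runB l).1 ++ [((l.length : Int) - (runB l).2.getD (String.ofList [ch]) 0,
            String.ofList [ch])]
        else (runB l).1) := rfl
    have hcont : (runB l).2.contains (String.ofList [ch]) =
        ((occI l (String.ofList [ch])).getLast?).isSome := by
      rw [PySem.Dict.contains_eq_isSome_get?, ih1]
    have hgetD : (runB l).2.getD (String.ofList [ch]) 0 =
        ((occI l (String.ofList [ch])).getLast?).getD 0 := by
      rw [PySem.Dict.getD_eq_get?_getD, ih1]
    constructor
    · intro c
      rw [runB_append, h2, PySem.Dict.get?_insert, occI_append]
      by_cases hc : c = String.ofList [ch]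
      · simp [hc]
      · have hcc : ¬ (String.ofList [ch] = c) := fun h => hc h.symm
        simp [hc, hcc, ih1]
    · intro c
      rw [runB_append, h1, occI_append]
      cases hlast : (occI l (String.ofList [ch])).getLast? with
      | none =>
        have hnil : occI l (String.ofList [ch]) = [] := List.getLast?_eq_none_iff.mp hlast
        rw [hcont, hlast]
        simp only [Option.isSome_none, if_neg Bool.false_ne_true]
        by_cases hc : String.ofList [ch] = c
        · rw [← hc, hnil]
          simp [adjG, ih2, hnil]
        · simp [hc, ih2]
      | some a =>
        rw [hcont, hgetD, hlast]
        simp only [Option.isSome_some, if_pos, Option.getD_some]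
        rw [List.filter_append]
        by_cases hc : String.ofList [ch] = c
        · rw [← hc]
          simp only [beq_self_eq_true, List.filter_cons, if_pos]
          rw [adjG_append, hlast]
          simp [ih2]
        · have : (String.ofList [ch] == c) = false := by
            rw [beq_eq_false_iff_ne]; exact hc
          simp [this, hc, ih2]

-- two lists of (gap, char) pairs with equal per-char filters are permutations
lemma perm_of_filter_snd (l1 l2 : List (Int × String))
    (h : ∀ c : String, l1.filter (fun p => p.2 == c) = l2.filter (fun p => p.2 == c)) :
    l1.Perm l2 := by
  rw [List.perm_iff_count]
  intro a
  have h1 : l1.count a = (l1.filter (fun p => p.2 == a.2)).count a :=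
    (List.count_filter (by simp)).symm
  have h2 : l2.count a = (l2.filter (fun p => p.2 == a.2)).count a :=
    (List.count_filter (by simp)).symm
  rw [h1, h2, h a.2]

-- ===== VERDICT (by name: the statements are the Claim_ definitions above) =====
theorem max_separator_spec : Claim_equal_max_separator := by
  intro txt _ hpre
  show max_separator txt = max_separator_alt txt
  -- names for the two pipelines
  have hl : txt.toList ≠ [] := by
    intro h
    exact hpre (by
      have := congrArg String.ofList h
      simpa using this)
  set l := txt.toList with hldef
  have hE : esL l ≠ [] := by
    intro h
    have := congrArg List.length h
    simp [esL, PySem.List.enumerate_eq_zipIdx_map] at this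
    exact hl this
  have hdne : PySem.List.sorted (esL l) (fun x => x.1) false ≠ [] := by
    rw [Ne, PySem.List.sorted_eq_nil_iff]
    exact hE
  obtain ⟨d0, dt, hd⟩ : ∃ d0 dt,
      PySem.List.sorted (esL l) (fun x => x.1) false = d0 :: dt := by
    cases h : PySem.List.sorted (esL l) (fun x => x.1) false with
    | nil => exact absurd h hdne
    | cons a t => exact ⟨a, t, rfl⟩
  -- A's r list is the structural scan of the sorted list
  have hloop : (aLoop (d0 :: dt) ([], d0.1)).1 = scanR (d0 :: dt) := by
    rw [aLoop_eq_scanR]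
    simp
  -- the permutation between A's r list and B's gaps list
  have hperm : (scanR (d0 :: dt)).Perm (runB l).1 := by
    apply perm_of_filter_snd
    intro c
    rw [scanR_filter c (d0 :: dt)
        (by rw [← hd]; exact PySem.List.sorted_pairwise (esL l) (fun p => p.1)),
      (runB_inv l).2 c]
    rw [← hd, filter_fst_sorted]
    rfl
  -- unfold both ports
  rw [max_separator, max_separator_alt]
  simp only [← hldef]
  rw [show ((PySem.List.enumerate l 0).map (fun p => (String.ofList [p.2], p.1))) = esL l
      from rfl]
  rw [hd]
  rw [show ((PySem.List.enumerate l 0).foldl bStep ([], PySem.Dict.empty)) = runB l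
      from rfl]
  simp only [hloop]
  -- case: no repeated character at all
  cases hG : (runB l).1 with
  | nil =>
    have hrnil : scanR (d0 :: dt) = [] := List.Perm.eq_nil (hG ▸ hperm)
    rw [hrnil]
    simp [PySem.List.sorted]
  | cons g gt =>
    have hGne : (runB l).1 ≠ [] := by rw [hG]; simp
    have hrne : scanR (d0 :: dt) ≠ [] := by
      intro h
      rw [h] at hperm
      exact hGne (hperm.symm.eq_nil)
    -- A's reverse-sorted r list is nonempty; name its head
    obtain ⟨m, rt, hr2⟩ : ∃ m rt,
        PySem.List.sorted (scanR (d0 :: dt)) (fun x => x.1) true = m :: rt := by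
      cases h : PySem.List.sorted (scanR (d0 :: dt)) (fun x => x.1) true with
      | nil => exact absurd (by rwa [PySem.List.sorted_eq_nil_iff] at h) hrne
      | cons a t => exact ⟨a, t, rfl⟩
    -- B's max over the gap values
    obtain ⟨best, hbestdef⟩ : ∃ best,
        PySem.List.max? ((runB l).1.map (fun p => p.1)) (fun x => x) = some best := by
      cases h : PySem.List.max? ((runB l).1.map (fun p => p.1)) (fun x => x) with
      | none =>
        rw [PySem.List.max?_eq_none_iff, List.map_eq_nil_iff] at h
        exact absurd h hGne
      | some b => exact ⟨b, rfl⟩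
    -- the head key of the descending sort equals B's max
    have hmax : m.1 = best := by
      have hub : ∀ y ∈ scanR (d0 :: dt), y.1 ≤ m.1 :=
        PySem.List.key_head_sorted_rev_ge (scanR (d0 :: dt)) (fun x => x.1) hr2
      have hmem : m ∈ scanR (d0 :: dt) := by
        have : m ∈ PySem.List.sorted (scanR (d0 :: dt)) (fun x => x.1) true := by
          rw [hr2]; simp
        rwa [PySem.List.mem_sorted] at this
      have h1 : m.1 ≤ best := by
        apply PySem.List.max?_isMax hbestdef
        exact List.mem_map_of_mem (hperm.mem_iff.mp hmem)
      have h2 : best ≤ m.1 := by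
        have hbm := PySem.List.max?_mem hbestdef
        obtain ⟨p, hp, hpb⟩ := List.mem_map.mp hbm
        rw [← hpb]
        exact hub p (hperm.mem_iff.mpr hp)
      exact le_antisymm h1 h2
    rw [hG] at hperm hbestdef
    rw [hr2]
    simp only [hbestdef, List.isEmpty_cons, Bool.false_eq_true, if_false]
    rw [PySem.List.pyGetD_zero_cons]
    apply PySem.List.sorted_eq_sorted_of_perm _ _ _ (fun a b h => h)
    apply List.Perm.map
    rw [hmax]
    apply List.Perm.filter
    exact (hr2 ▸ PySem.List.sorted_perm (scanR (d0 :: dt)) (fun x => x.1) true).trans hperm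

theorem max_separator_raises : Claim_raises_max_separator := by
  unfold Claim_raises_max_separator
  exact ⟨fun txt _ hr hp => hp hr, by decide⟩

-- self-check of the crash-fix witness: B's port really returns [] on the excluded empty string
theorem max_separator_raises_ok :
    max_separator_alt pvRaiseWitness_max_separator = pvRaiseWitnessOut_max_separator :=
  max_separator_raises.2.2.2
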